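-- pv_equiv track=rewrite | github.com/eliottcassidy2000/math | 04-computation/moat_n8_analysis.py | compute_H_n8
-- ===== SOURCE A (Python) =====
-- from itertools import combinations
--
-- def count_directed_hamcycles(A, vertices):
--     """Count directed Hamiltonian cycles on a subset of vertices."""
--     k = len(vertices)
--     if k < 3 or k % 2 == 0:
--         return 0
--     vlist = list(vertices)
--     sub = [[0]*k for _ in range(k)]
--     for i in range(k):
--         for j in range(k):
--             if i != j:
--                 sub[i][j] = int(A[vlist[i]][vlist[j]])
--     full = (1 << k) - 1
--     dp = [[0]*k for _ in range(1 << k)]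
--     dp[1][0] = 1
--     for mask in range(1, 1 << k):
--         for v in range(k):
--             if dp[mask][v] == 0:
--                 continue
--             for u in range(1, k):
--                 if mask & (1 << u):
--                     continue
--                 if sub[v][u]:
--                     dp[mask | (1 << u)][u] += dp[mask][v]
--     total = 0
--     for v in range(1, k):
--         if dp[full][v] and sub[v][0]:
--             total += dp[full][v]
--     return total
--
-- def compute_H_n8(A, n):
--     """Compute H = 1 + 2*alpha_1 + 4*alpha_2 for n=8."""
--     # Enumerate all directed odd cycles on subsets
--     cycles = []
--     for size in range(3, n+1, 2):
--         for subset in combinations(range(n), size):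
--             cnt = count_directed_hamcycles(A, list(subset))
--             if cnt > 0:
--                 cycles.append((frozenset(subset), cnt, size))
--
--     alpha_1 = sum(cnt for _, cnt, _ in cycles)
--
--     # alpha_2 = weighted independent pairs
--     alpha_2 = 0
--     for i in range(len(cycles)):
--         for j in range(i+1, len(cycles)):
--             if len(cycles[i][0] & cycles[j][0]) == 0:
--                 alpha_2 += cycles[i][1] * cycles[j][1]
--
--     H = 1 + 2*alpha_1 + 4*alpha_2
--     return H, alpha_1, alpha_2
-- ===== SOURCE B (Python) =====
-- from itertools import combinations
--
-- def count_odd_cycles(A, vertices):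
--     """Count directed Hamiltonian cycles on the odd subset by top-down
--     recursion on the visited bitmask (anchored at the first vertex)."""
--     k = len(vertices)
--     if k < 3 or k % 2 == 0:
--         return 0
--     vlist = list(vertices)
--
--     def edge(i, j):
--         return i != j and bool(A[vlist[i]][vlist[j]])
--
--     full = (1 << k) - 1
--
--     def paths(mask, v):
--         # number of directed paths from vertex 0 to v visiting exactly `mask`
--         if mask == 1:
--             return 1 if v == 0 else 0
--         if v == 0 or not mask & (1 << v):
--             return 0
--         pm = mask ^ (1 << v)
--         return sum(paths(pm, u) for u in range(k) if pm & (1 << u) and edge(u, v))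
--
--     return sum(paths(full, v) for v in range(1, k) if edge(v, 0))
--
-- def compute_H_n8(A, n):
--     """Compute H = 1 + 2*alpha_1 + 4*alpha_2 for n=8."""
--     cycles = [(set(sub), cnt)
--               for size in range(3, n + 1, 2)
--               for sub in combinations(range(n), size)
--               if (cnt := count_odd_cycles(A, sub)) > 0]
--     alpha_1 = sum(c for _, c in cycles)
--     alpha_2 = sum(c1 * c2
--                   for i, (s1, c1) in enumerate(cycles)
--                   for s2, c2 in cycles[i + 1:]
--                   if not (s1 & s2))
--     return 1 + 2 * alpha_1 + 4 * alpha_2, alpha_1, alpha_2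
-- ===== Notes on version B (the rewrite author's own statement) =====
-- stated objective: alternative
-- what changed: The per-subset Hamiltonian-cycle counter replaces the bottom-up Held-Karp push DP over a 2^k x k table by a top-down recursion on the visited bitmask (number of paths from the anchor), and the outer code builds the cycle list with comprehensions and computes alpha_2 by enumerate-plus-suffix slices instead of index-based nested loops over a frozenset list.
-- outside the precondition, e.g. on compute_H_n8([[0, 1, 1], [1, 0, 1], [1, 1]], 3): A returns (5, 2, 0), B returns (5, 2, 0); on compute_H_n8([[0, 1], [1, 0]], 3): A raises IndexError, B raises IndexError
import Mathlib
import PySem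

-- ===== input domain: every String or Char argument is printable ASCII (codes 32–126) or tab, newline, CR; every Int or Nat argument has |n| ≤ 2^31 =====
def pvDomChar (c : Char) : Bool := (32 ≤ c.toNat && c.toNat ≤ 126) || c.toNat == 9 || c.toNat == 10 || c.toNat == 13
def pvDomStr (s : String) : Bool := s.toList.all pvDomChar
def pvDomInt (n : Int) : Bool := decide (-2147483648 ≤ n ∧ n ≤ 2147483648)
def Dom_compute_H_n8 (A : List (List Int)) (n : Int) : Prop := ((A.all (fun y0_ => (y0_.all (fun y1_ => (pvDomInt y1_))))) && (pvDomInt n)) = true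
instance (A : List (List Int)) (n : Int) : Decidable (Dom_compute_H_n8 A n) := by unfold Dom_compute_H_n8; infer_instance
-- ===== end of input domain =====

-- B replaces A's bottom-up Held–Karp bitmask DP table by a top-down recursion on the
-- visited bitmask (objective: alternative; same exponential cost, no 2^k×k table).

-- ===== PORT A =====
-- itertools.combinations(l, r) in lexicographic order (both Pythons call itertools.combinations)
def pyCombos : Nat → List Nat → List (List Nat)
  | 0, _ => [[]]
  | _ + 1, [] => []
  | r + 1, x :: xs => (pyCombos r xs).map (fun t => x :: t) ++ pyCombos (r + 1) xs

-- dp[m][v] read; indices are always in range in the Python, so the defaults are never hit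
def dgA (dp : List (List Int)) (m v : Nat) : Int := (dp.getD m []).getD v 0

-- sub[i][j] = int(A[vlist[i]][vlist[j]]) for i ≠ j, else 0 (indices in range under Pre_)
def subA (Amat : List (List Int)) (vlist : List Nat) (k : Nat) : List (List Int) :=
  (List.range k).map (fun i => (List.range k).map (fun j =>
    if i ≠ j then (Amat.getD (vlist.getD i 0) []).getD (vlist.getD j 0) 0 else 0))

-- body of `for u in range(1, k)`
def stepUA (sub : List (List Int)) (m v : Nat) (dp : List (List Int)) (u : Nat) : List (List Int) :=
  if m &&& (1 <<< u) ≠ 0 then dp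
  else if (sub.getD v []).getD u 0 ≠ 0 then
    dp.set (m ||| (1 <<< u))
      ((dp.getD (m ||| (1 <<< u)) []).set u (dgA dp (m ||| (1 <<< u)) u + dgA dp m v))
  else dp

-- body of `for v in range(k)` (`continue` when dp[mask][v] == 0)
def stepVA (sub : List (List Int)) (k m : Nat) (dp : List (List Int)) (v : Nat) : List (List Int) :=
  if dgA dp m v = 0 then dp
  else (List.range' 1 (k - 1)).foldl (stepUA sub m v) dp

-- body of `for mask in range(1, 1 << k)`
def stepMA (sub : List (List Int)) (k : Nat) (dp : List (List Int)) (m : Nat) : List (List Int) :=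
  (List.range k).foldl (stepVA sub k m) dp

def countA (Amat : List (List Int)) (vertices : List Nat) : Int :=
  let k := vertices.length
  if k < 3 ∨ k % 2 = 0 then 0
  else
    let sub := subA Amat vertices k
    let full := 2 ^ k - 1
    let dp0 := (List.replicate (2 ^ k) (List.replicate k (0 : Int))).set 1
      ((List.replicate k (0 : Int)).set 0 1)
    let dp := (List.range' 1 (2 ^ k - 1)).foldl (stepMA sub k) dp0
    (List.range' 1 (k - 1)).foldl (fun total v =>
      if dgA dp full v ≠ 0 ∧ (sub.getD v []).getD 0 0 ≠ 0 then total + dgA dp full v else total) 0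

-- the frozenset of a combination (distinct elements) is carried as the list itself;
-- len(s1 & s2) == 0 is ported as the length of a membership filter
def compute_H_n8 (A : List (List Int)) (n : Int) : Int × Int × Int :=
  let cycles : List (List Nat × Int × Int) :=
    (PySem.List.pyRange 3 (n + 1) 2).foldl (fun cyc size =>
      (pyCombos size.toNat (List.range n.toNat)).foldl (fun cyc subset =>
        let cnt := countA A subset
        if cnt > 0 then cyc ++ [(subset, cnt, size)] else cyc) cyc) []
  let alpha1 := cycles.foldl (fun s c => s + c.2.1) 0
  let L := cycles.length
  let alpha2 := (List.range L).foldl (fun a2 i =>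
    (List.range' (i + 1) (L - (i + 1))).foldl (fun a2 j =>
      if ((cycles.getD i ([], 0, 0)).1.filter
            (fun x => x ∈ (cycles.getD j ([], 0, 0)).1)).length = 0
      then a2 + (cycles.getD i ([], 0, 0)).2.1 * (cycles.getD j ([], 0, 0)).2.1 else a2) a2) 0
  (1 + 2 * alpha1 + 4 * alpha2, alpha1, alpha2)

-- ===== PORT B =====
def edgeB (Amat : List (List Int)) (vlist : List Nat) (i j : Nat) : Bool :=
  decide (i ≠ j) && decide ((Amat.getD (vlist.getD i 0) []).getD (vlist.getD j 0) 0 ≠ 0)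

-- termination: clearing a set bit shrinks the mask
theorem pvXorShiftLt (m v : Nat) (h : m &&& (1 <<< v) ≠ 0) : m ^^^ (1 <<< v) < m := by
  rw [Nat.one_shiftLeft] at *
  rw [Nat.and_two_pow] at h
  apply Nat.lt_of_testBit v
  · simp [Nat.testBit_xor, Nat.testBit_two_pow]
    cases hb : m.testBit v
    · simp [hb] at h
    · simp [hb]
  · cases hb : m.testBit v
    · simp [hb] at h
    · rfl
  · intro j hj
    simp [Nat.testBit_xor, Nat.testBit_two_pow, Nat.ne_of_lt hj]

def pathsB (Amat : List (List Int)) (vlist : List Nat) (k mask v : Nat) : Int :=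
  if mask = 1 then (if v = 0 then 1 else 0)
  else if v = 0 ∨ mask &&& (1 <<< v) = 0 then 0
  else
    let pm := mask ^^^ (1 <<< v)
    (((List.range k).filter (fun u => decide (pm &&& (1 <<< u) ≠ 0) && edgeB Amat vlist u v)).map
      (fun u => pathsB Amat vlist k pm u)).sum
termination_by mask
decreasing_by
  exact pvXorShiftLt mask v (by tauto)

def countB (Amat : List (List Int)) (vertices : List Nat) : Int :=
  let k := vertices.length
  if k < 3 ∨ k % 2 = 0 then 0
  else
    (((List.range' 1 (k - 1)).filter (fun v => edgeB Amat vertices v 0)).map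
      (fun v => pathsB Amat vertices k (2 ^ k - 1) v)).sum

def compute_H_n8_alt (A : List (List Int)) (n : Int) : Int × Int × Int :=
  let cycles : List (List Nat × Int) :=
    (PySem.List.pyRange 3 (n + 1) 2).flatMap (fun size =>
      (pyCombos size.toNat (List.range n.toNat)).filterMap (fun sub =>
        let cnt := countB A sub
        if cnt > 0 then some (sub, cnt) else none))
  let alpha1 := (cycles.map (fun c => c.2)).sum
  let alpha2 := (cycles.zipIdx.flatMap (fun ci =>
    (cycles.drop (ci.2 + 1)).filterMap (fun d =>
      if (ci.1.1.filter (fun x => x ∈ d.1)).length = 0 then some (ci.1.2 * d.2) else none))).sum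
  (1 + 2 * alpha1 + 4 * alpha2, alpha1, alpha2)

-- ===== PRECONDITION & SPEC =====
-- A indexes A[i][j] for all i ≠ j below n once n ≥ 3; Pre_ excludes the inputs where that
-- indexing raises IndexError, requiring a full n columns in each of the first n rows —
-- slightly conservative: the diagonal entry of the last row is never read, so A (and B,
-- identically) can still return when row n-1 has only n-1 entries.
def Pre_compute_H_n8 (A : List (List Int)) (n : Int) : Prop :=
  3 ≤ n → (n ≤ (A.length : Int) ∧ ∀ row ∈ A.take n.toNat, n ≤ (row.length : Int))
instance (A : List (List Int)) (n : Int) : Decidable (Pre_compute_H_n8 A n) := by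
  unfold Pre_compute_H_n8; infer_instance

def pvWitness_compute_H_n8 : List (List Int) × Int := ([[0, 1, 1], [1, 0, 1], [1, 1, 0]], 3)

def Spec_compute_H_n8 (A : List (List Int)) (n : Int) (out : Int × Int × Int) : Prop := out = compute_H_n8_alt A n
instance (A : List (List Int)) (n : Int) (out : Int × Int × Int) : Decidable (Spec_compute_H_n8 A n out) := by unfold Spec_compute_H_n8; infer_instance

-- ===== CLAIM (what is proved, stated in full; the proofs are below) =====
def Claim_equal_compute_H_n8 : Prop := ∀ (A : List (List Int)) (n : Int), Dom_compute_H_n8 A n → Pre_compute_H_n8 A n → Spec_compute_H_n8 A n (compute_H_n8 A n)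

-- ===== LEMMAS AND PROOFS =====

-- ---- bit arithmetic ----
theorem pvAndShift (m u : Nat) : (m &&& (1 <<< u) ≠ 0) ↔ m.testBit u = true := by
  rw [Nat.one_shiftLeft, Nat.and_two_pow]
  cases h : m.testBit u <;> simp [h]

theorem pvOrNe (m u : Nat) (h : m.testBit u = false) : m ||| (1 <<< u) ≠ m := by
  intro he
  have := congrArg (fun x => x.testBit u) he
  simp [Nat.testBit_or, Nat.one_shiftLeft, Nat.testBit_two_pow, h] at this

theorem pvOrLtPow (m u k : Nat) (hm : m < 2 ^ k) (hu : u < k) : m ||| (1 <<< u) < 2 ^ k := by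
  exact Nat.or_lt_two_pow hm (by rw [Nat.one_shiftLeft]; exact Nat.pow_lt_pow_right (by norm_num) hu)

theorem pvOrXor (m w : Nat) (h : m.testBit w = false) : (m ||| (1 <<< w)) ^^^ (1 <<< w) = m := by
  apply Nat.eq_of_testBit_eq
  intro i
  by_cases hi : w = i
  · subst hi; simp [Nat.testBit_xor, Nat.testBit_or, Nat.one_shiftLeft, Nat.testBit_two_pow, h]
  · simp [Nat.testBit_xor, Nat.testBit_or, Nat.one_shiftLeft, Nat.testBit_two_pow, hi]

theorem pvTestBitOr (m u : Nat) : (m ||| (1 <<< u)).testBit u = true := by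
  simp [Nat.testBit_or, Nat.one_shiftLeft, Nat.testBit_two_pow]

theorem pvXorLtOfTestBit (m v : Nat) (h : m.testBit v = true) : m ^^^ (1 <<< v) < m := by
  apply Nat.lt_of_testBit v
  · simp [Nat.testBit_xor, Nat.one_shiftLeft, Nat.testBit_two_pow, h]
  · exact h
  · intro j hj
    simp [Nat.testBit_xor, Nat.one_shiftLeft, Nat.testBit_two_pow, Nat.ne_of_lt hj]

-- characterisation of 'the cell (m'',w) receives its contributions while mask m is processed'
theorem pvFlip (m m'' w : Nat) :
    (m''.testBit w = true ∧ m'' ^^^ (1 <<< w) = m) ↔ (m.testBit w = false ∧ m'' = m ||| (1 <<< w)) := by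
  constructor
  · rintro ⟨hb, he⟩
    subst he
    refine ⟨by simp [Nat.testBit_xor, Nat.one_shiftLeft, Nat.testBit_two_pow, hb], ?_⟩
    apply Nat.eq_of_testBit_eq
    intro i
    by_cases hi : w = i
    · subst hi; simp [Nat.testBit_or, Nat.testBit_xor, Nat.one_shiftLeft, Nat.testBit_two_pow, hb]
    · simp [Nat.testBit_or, Nat.testBit_xor, Nat.one_shiftLeft, Nat.testBit_two_pow, hi]
  · rintro ⟨hb, he⟩
    subst he
    exact ⟨pvTestBitOr m w, pvOrXor m w hb⟩

-- ---- dgA / set ----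
theorem pvDgSet (dp : List (List Int)) (M W : Nat) (x : Int)
    (hM : M < dp.length) (hW : W < (dp.getD M []).length) (m v : Nat) :
    dgA (dp.set M ((dp.getD M []).set W (dgA dp M W + x))) m v
      = dgA dp m v + (if m = M ∧ v = W then x else 0) := by
  unfold dgA
  by_cases hm : m = M
  · subst hm
    rw [List.getD_eq_getElem?_getD (l := dp.set m _), List.getElem?_set_self (by simpa using hM)]
    simp only [Option.getD_some]
    by_cases hv : v = W
    · subst hv
      rw [List.getD_eq_getElem?_getD (l := (dp.getD m []).set v _), List.getElem?_set_self hW]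
      simp
    · rw [List.getD_eq_getElem?_getD (l := (dp.getD m []).set W _), List.getElem?_set_ne (Ne.symm hv),
        ← List.getD_eq_getElem?_getD]
      simp [hv]
  · rw [List.getD_eq_getElem?_getD (l := dp.set M _), List.getElem?_set_ne (fun h => hm h.symm),
      ← List.getD_eq_getElem?_getD]
    simp [hm]

def pvShape (k : Nat) (dp : List (List Int)) : Prop :=
  dp.length = 2 ^ k ∧ ∀ r ∈ dp, r.length = k

-- ---- sub / edge ----
theorem pvSubGet (Amat : List (List Int)) (vl : List Nat) (k i j : Nat) (hi : i < k) (hj : j < k) :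
    ((subA Amat vl k).getD i []).getD j 0
      = if i ≠ j then (Amat.getD (vl.getD i 0) []).getD (vl.getD j 0) 0 else 0 := by
  unfold subA
  rw [List.getD_eq_getElem ((List.range k).map _) [] (by simpa using hi),
      List.getElem_map, List.getElem_range,
      List.getD_eq_getElem ((List.range k).map _) 0 (by simpa using hj),
      List.getElem_map, List.getElem_range]

theorem pvSubEdge (Amat : List (List Int)) (vl : List Nat) (k i j : Nat) (hi : i < k) (hj : j < k) :
    (((subA Amat vl k).getD i []).getD j 0 ≠ 0) ↔ edgeB Amat vl i j = true := by
  rw [pvSubGet Amat vl k i j hi hj]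
  unfold edgeB
  by_cases hij : i = j <;> simp [hij]

-- ---- generic sum/fold reshaping ----
theorem pvFoldIfAdd {α : Type} (l : List α) (c : α → Prop) [DecidablePred c]
    (g : α → Int) (a : Int) :
    l.foldl (fun s x => if c x then s + g x else s) a
      = a + (l.map (fun x => if c x then g x else 0)).sum := by
  induction l generalizing a with
  | nil => simp
  | cons y t ih =>
    simp only [List.foldl_cons, List.map_cons, List.sum_cons, ih]
    split <;> ring

theorem pvFilterMapSum {α : Type} (l : List α) (c : α → Prop) [DecidablePred c] (g : α → Int) :
    (l.filterMap (fun x => if c x then some (g x) else none)).sum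
      = (l.map (fun x => if c x then g x else 0)).sum := by
  induction l with
  | nil => simp
  | cons y t ih =>
    by_cases h : c y <;> simp [List.filterMap_cons, h, ih]

theorem pvFilterMapSum' {α : Type} (l : List α) (c : α → Bool) (g : α → Int) :
    ((l.filter c).map g).sum = (l.map (fun x => if c x then g x else 0)).sum := by
  induction l with
  | nil => simp
  | cons y t ih =>
    by_cases h : c y <;> simp [List.filter_cons, h, ih]

theorem pvSumFlatMap {α : Type} (l : List α) (g : α → List Int) :
    (l.flatMap g).sum = (l.map (fun x => (g x).sum)).sum := by
  induction l with
  | nil => simp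
  | cons y t ih => simp [List.flatMap_cons, List.sum_append, ih]

-- ---- pathsB facts ----
theorem pvFZero (Amat : List (List Int)) (vl : List Nat) (k m u : Nat)
    (h : m.testBit u = false) : pathsB Amat vl k m u = 0 := by
  rw [pathsB]
  by_cases h1 : m = 1
  · subst h1
    have hu : u ≠ 0 := by
      intro h0
      subst h0
      rw [show (1 : Nat) = 2 ^ 0 from rfl, Nat.testBit_two_pow] at h
      simp at h
    simp [hu]
  · have hz : m &&& (1 <<< u) = 0 := by
      by_contra hne
      exact absurd ((pvAndShift m u).mp hne) (by simp [h])
    simp [h1, hz]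

-- the recurrence, summed over all of range k (terms at vertices outside m vanish)
theorem pvFRec (Amat : List (List Int)) (vl : List Nat) (k m w : Nat)
    (hw : 1 ≤ w) (hwk : w < k) (hm : m.testBit w = false) (hm0 : 0 < m) :
    pathsB Amat vl k (m ||| (1 <<< w)) w
      = ((List.range k).map (fun u =>
          if ((subA Amat vl k).getD u []).getD w 0 ≠ 0 then pathsB Amat vl k m u else 0)).sum := by
  have hne1 : m ||| (1 <<< w) ≠ 1 := by
    intro h1
    have hb := pvTestBitOr m w
    rw [h1, show (1 : Nat) = 2 ^ 0 from rfl, Nat.testBit_two_pow] at hb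
    simp at hb
    omega
  have hbit : (m ||| (1 <<< w)) &&& (1 <<< w) ≠ 0 := (pvAndShift _ w).mpr (pvTestBitOr m w)
  rw [pathsB, if_neg hne1, if_neg (by push_neg; exact ⟨by omega, hbit⟩)]
  simp only [pvOrXor m w hm]
  rw [pvFilterMapSum']
  apply congrArg
  apply List.map_congr_left
  intro u hu
  have huk : u < k := List.mem_range.mp hu
  cases hbu : m.testBit u
  · have hz := pvFZero Amat vl k m u hbu
    rw [hz]
    split <;> split <;> rfl
  · have hd : m &&& (1 <<< u) ≠ 0 := (pvAndShift m u).mpr hbu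
    have he := pvSubEdge Amat vl k u w huk hwk
    by_cases hedge : edgeB Amat vl u w = true
    · rw [if_pos (by simp [hd, hedge]), if_pos (he.mpr hedge)]
    · rw [if_neg (by simp [hedge]), if_neg (fun hc => hedge (he.mp hc))]

-- ---- the DP table as a function of how many masks have been processed ----
def valT (Amat : List (List Int)) (vl : List Nat) (k m m' v : Nat) : Int :=
  if 1 ≤ v ∧ m'.testBit v = true ∧ m' ^^^ (1 <<< v) < m then pathsB Amat vl k m' v
  else if m' = 1 ∧ v = 0 then 1 else 0

def tblT (Amat : List (List Int)) (vl : List Nat) (k m : Nat) : List (List Int) :=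
  (List.range (2 ^ k)).map (fun m' => (List.range k).map (valT Amat vl k m m'))

theorem pvTblShape (Amat : List (List Int)) (vl : List Nat) (k m : Nat) :
    pvShape k (tblT Amat vl k m) := by
  constructor
  · simp [tblT]
  · intro r hr
    unfold tblT at hr
    obtain ⟨m', _, rfl⟩ := List.mem_map.mp hr
    simp

theorem pvTblGet (Amat : List (List Int)) (vl : List Nat) (k m m' v : Nat)
    (hm' : m' < 2 ^ k) (hv : v < k) :
    dgA (tblT Amat vl k m) m' v = valT Amat vl k m m' v := by
  unfold dgA tblT
  rw [List.getD_eq_getElem _ [] (by simpa using hm'), List.getElem_map, List.getElem_range,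
      List.getD_eq_getElem _ 0 (by simpa using hv), List.getElem_map, List.getElem_range]

theorem pvTblRowDiag (Amat : List (List Int)) (vl : List Nat) (k m v : Nat)
    (hv : v < k) (hm : 0 < m) (hmk : m < 2 ^ k) :
    dgA (tblT Amat vl k m) m v = pathsB Amat vl k m v := by
  rw [pvTblGet Amat vl k m m v hmk hv]
  unfold valT
  by_cases hv0 : v = 0
  · subst hv0
    rw [if_neg (by omega)]
    by_cases h1 : m = 1
    · subst h1; rw [pathsB]; simp
    · rw [pathsB]; simp [h1]
  · cases hb : m.testBit v
    · rw [if_neg (by simp [hb]), if_neg (by simp [hv0])]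
      exact (pvFZero Amat vl k m v hb).symm
    · rw [if_pos ⟨by omega, rfl, pvXorLtOfTestBit m v hb⟩]

theorem pvDgEqTbl (Amat : List (List Int)) (vl : List Nat) (k m : Nat) (dp : List (List Int))
    (hs : pvShape k dp)
    (h : ∀ m'' < 2 ^ k, ∀ w < k, dgA dp m'' w = valT Amat vl k m m'' w) :
    dp = tblT Amat vl k m := by
  have hlen : dp.length = (tblT Amat vl k m).length := by
    rw [hs.1]; simp [tblT]
  apply List.ext_getElem hlen
  intro i h1 h2
  have hik : i < 2 ^ k := by rw [← hs.1]; exact h1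
  have hrow : dp[i].length = k := hs.2 _ (List.getElem_mem h1)
  have hrow2 : (tblT Amat vl k m)[i].length = k :=
    (pvTblShape Amat vl k m).2 _ (List.getElem_mem h2)
  apply List.ext_getElem (by rw [hrow, hrow2])
  intro j hj1 hj2
  have hjk : j < k := by rw [← hrow]; exact hj1
  have hg := h i hik j hjk
  have ht := pvTblGet Amat vl k m i j hik hjk
  unfold dgA at hg ht
  rw [List.getD_eq_getElem dp [] h1, List.getD_eq_getElem _ 0 hj1] at hg
  rw [List.getD_eq_getElem _ [] h2, List.getD_eq_getElem _ 0 hj2] at ht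
  rw [hg, ← ht]

-- ---- the three nested loops ----
theorem pvInner (sub : List (List Int)) (k m v : Nat) (dp : List (List Int))
    (hs : pvShape k dp) (hm : m < 2 ^ k) (us : List Nat) (hus : us.Nodup)
    (husb : ∀ u ∈ us, 1 ≤ u ∧ u < k) :
    pvShape k (us.foldl (stepUA sub m v) dp) ∧
    ∀ m'' w, dgA (us.foldl (stepUA sub m v) dp) m'' w
      = dgA dp m'' w +
        (if w ∈ us ∧ m.testBit w = false ∧ m'' = m ||| (1 <<< w) ∧ (sub.getD v []).getD w 0 ≠ 0
         then dgA dp m v else 0) := by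
  induction us generalizing dp with
  | nil => exact ⟨hs, by intro m'' w; simp⟩
  | cons u t ih =>
    obtain ⟨hu1, huk⟩ := husb u List.mem_cons_self
    have hnd := List.nodup_cons.mp hus
    by_cases hbit : m &&& (1 <<< u) ≠ 0
    · have hstep : stepUA sub m v dp u = dp := by unfold stepUA; rw [if_pos hbit]
      rw [List.foldl_cons, hstep]
      obtain ⟨S, H⟩ := ih dp hs hnd.2 (fun x hx => husb x (List.mem_cons_of_mem u hx))
      refine ⟨S, fun m'' w => ?_⟩
      rw [H]
      congr 1
      by_cases hw : w = u
      · subst hw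
        have htb : m.testBit w = true := (pvAndShift m w).mp hbit
        rw [if_neg (fun hc => by rw [hc.2.1] at htb; simp at htb),
            if_neg (fun hc => by rw [hc.2.1] at htb; simp at htb)]
      · have : (w ∈ u :: t) ↔ (w ∈ t) := by simp [List.mem_cons, hw]
        by_cases hc : w ∈ t ∧ m.testBit w = false ∧ m'' = m ||| (1 <<< w) ∧
            (sub.getD v []).getD w 0 ≠ 0
        · rw [if_pos hc, if_pos ⟨this.mpr hc.1, hc.2⟩]
        · rw [if_neg hc, if_neg (fun hc2 => hc ⟨this.mp hc2.1, hc2.2⟩)]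
    · have htb : m.testBit u = false := by
        cases hb : m.testBit u
        · rfl
        · exact absurd ((pvAndShift m u).mpr hb) hbit
      by_cases hsub : (sub.getD v []).getD u 0 ≠ 0
      · have hM : m ||| (1 <<< u) < dp.length := by rw [hs.1]; exact pvOrLtPow m u k hm huk
        have hrowmem : dp.getD (m ||| (1 <<< u)) [] ∈ dp := by
          rw [List.getD_eq_getElem _ _ hM]; exact List.getElem_mem hM
        have hW : u < (dp.getD (m ||| (1 <<< u)) []).length := by
          rw [hs.2 _ hrowmem]; exact huk
        have hstep : stepUA sub m v dp u
            = dp.set (m ||| (1 <<< u))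
                ((dp.getD (m ||| (1 <<< u)) []).set u
                  (dgA dp (m ||| (1 <<< u)) u + dgA dp m v)) := by
          unfold stepUA
          rw [if_neg hbit, if_pos hsub]
        have hdg1 := pvDgSet dp (m ||| (1 <<< u)) u (dgA dp m v) hM hW
        have hs1 : pvShape k (stepUA sub m v dp u) := by
          rw [hstep]
          refine ⟨by simp [hs.1], ?_⟩
          intro r hr
          rcases List.mem_or_eq_of_mem_set hr with h | h
          · exact hs.2 _ h
          · subst h; rw [List.length_set]; exact hs.2 _ hrowmem
        have hMne : m ||| (1 <<< u) ≠ m := pvOrNe m u htb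
        have hmv : dgA (stepUA sub m v dp u) m v = dgA dp m v := by
          rw [hstep, hdg1, if_neg (fun hc => hMne hc.1.symm)]
          ring
        rw [List.foldl_cons]
        obtain ⟨S, H⟩ := ih (stepUA sub m v dp u) hs1 hnd.2
          (fun x hx => husb x (List.mem_cons_of_mem u hx))
        refine ⟨S, fun m'' w => ?_⟩
        rw [H, hmv, hstep, hdg1]
        by_cases hw : w = u
        · subst hw
          rw [if_neg (fun hc : w ∈ t ∧ _ => hnd.1 hc.1)]
          by_cases hm'' : m'' = m ||| (1 <<< w)
          · rw [if_pos ⟨hm'', rfl⟩,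
              if_pos ⟨List.mem_cons_self, htb, hm'', hsub⟩]
            ring
          · rw [if_neg (fun hc => hm'' hc.1), if_neg (fun hc => hm'' hc.2.2.1)]
            ring
        · rw [if_neg (fun hc => hw hc.2)]
          have hmem : (w ∈ u :: t) ↔ (w ∈ t) := by simp [List.mem_cons, hw]
          by_cases hc : w ∈ t ∧ m.testBit w = false ∧ m'' = m ||| (1 <<< w) ∧
              (sub.getD v []).getD w 0 ≠ 0
          · rw [if_pos hc, if_pos ⟨hmem.mpr hc.1, hc.2⟩]
            ring
          · rw [if_neg hc, if_neg (fun hc2 => hc ⟨hmem.mp hc2.1, hc2.2⟩)]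
            ring
      · have hstep : stepUA sub m v dp u = dp := by
          unfold stepUA
          rw [if_neg hbit, if_neg hsub]
        rw [List.foldl_cons, hstep]
        obtain ⟨S, H⟩ := ih dp hs hnd.2 (fun x hx => husb x (List.mem_cons_of_mem u hx))
        refine ⟨S, fun m'' w => ?_⟩
        rw [H]
        congr 1
        by_cases hw : w = u
        · subst hw
          rw [if_neg (fun hc => hsub hc.2.2.2), if_neg (fun hc => hsub hc.2.2.2)]
        · have hmem : (w ∈ u :: t) ↔ (w ∈ t) := by simp [List.mem_cons, hw]
          by_cases hc : w ∈ t ∧ m.testBit w = false ∧ m'' = m ||| (1 <<< w) ∧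
              (sub.getD v []).getD w 0 ≠ 0
          · rw [if_pos hc, if_pos ⟨hmem.mpr hc.1, hc.2⟩]
          · rw [if_neg hc, if_neg (fun hc2 => hc ⟨hmem.mp hc2.1, hc2.2⟩)]

theorem pvMiddle (sub : List (List Int)) (k m : Nat) (dp : List (List Int))
    (hs : pvShape k dp) (hm : m < 2 ^ k) (vs : List Nat) :
    pvShape k (vs.foldl (stepVA sub k m) dp) ∧
    ∀ m'' w, dgA (vs.foldl (stepVA sub k m) dp) m'' w
      = dgA dp m'' w +
        (vs.map (fun v =>
          if 1 ≤ w ∧ w < k ∧ m.testBit w = false ∧ m'' = m ||| (1 <<< w) ∧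
             (sub.getD v []).getD w 0 ≠ 0
          then dgA dp m v else 0)).sum := by
  induction vs generalizing dp with
  | nil => exact ⟨hs, by intro m'' w; simp⟩
  | cons v t ih =>
    have hone : pvShape k (stepVA sub k m dp v) ∧ ∀ m'' w,
        dgA (stepVA sub k m dp v) m'' w = dgA dp m'' w +
          (if 1 ≤ w ∧ w < k ∧ m.testBit w = false ∧ m'' = m ||| (1 <<< w) ∧
              (sub.getD v []).getD w 0 ≠ 0 then dgA dp m v else 0) := by
      unfold stepVA
      by_cases h0 : dgA dp m v = 0
      · rw [if_pos h0]
        refine ⟨hs, fun m'' w => ?_⟩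
        rw [h0]
        split <;> ring
      · rw [if_neg h0]
        obtain ⟨S, H⟩ := pvInner sub k m v dp hs hm (List.range' 1 (k - 1))
          (List.nodup_range')
          (fun x hx => by have := List.mem_range'_1.mp hx; omega)
        refine ⟨S, fun m'' w => ?_⟩
        rw [H]
        congr 1
        by_cases hc : 1 ≤ w ∧ w < k ∧ m.testBit w = false ∧ m'' = m ||| (1 <<< w) ∧
            (sub.getD v []).getD w 0 ≠ 0
        · rw [if_pos ⟨List.mem_range'_1.mpr ⟨hc.1, by have h2 := hc.2.1; omega⟩, hc.2.2.1, hc.2.2.2⟩, if_pos hc]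
        · rw [if_neg (fun hc2 => hc
            ⟨(List.mem_range'_1.mp hc2.1).1,
              by have h1 := (List.mem_range'_1.mp hc2.1).1
                 have h2 := (List.mem_range'_1.mp hc2.1).2
                 omega,
              hc2.2⟩), if_neg hc]
    obtain ⟨S1, H1⟩ := hone
    have hmvs : ∀ v', dgA (stepVA sub k m dp v) m v' = dgA dp m v' := by
      intro v'
      rw [H1]
      rw [if_neg (fun hc => pvOrNe m _ hc.2.2.1 hc.2.2.2.1.symm)]
      ring
    rw [List.foldl_cons]
    obtain ⟨S, H⟩ := ih (stepVA sub k m dp v) S1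
    refine ⟨S, fun m'' w => ?_⟩
    rw [H, H1 m'' w]
    simp only [List.map_cons, List.sum_cons, hmvs]
    ring

theorem pvStep (Amat : List (List Int)) (vl : List Nat) (k m : Nat)
    (hm : 0 < m) (hmk : m < 2 ^ k) :
    stepMA (subA Amat vl k) k (tblT Amat vl k m) m = tblT Amat vl k (m + 1) := by
  unfold stepMA
  obtain ⟨S, H⟩ := pvMiddle (subA Amat vl k) k m (tblT Amat vl k m)
    (pvTblShape Amat vl k m) hmk (List.range k)
  apply pvDgEqTbl Amat vl k (m + 1) _ S
  intro m'' hm'' w hw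
  rw [H m'' w, pvTblGet Amat vl k m m'' w hm'' hw]
  by_cases hD : 1 ≤ w ∧ m.testBit w = false ∧ m'' = m ||| (1 <<< w)
  · obtain ⟨hw1, htb, hme⟩ := hD
    have hval0 : valT Amat vl k m m'' w = 0 := by
      unfold valT
      rw [if_neg (fun hc => by
            have hlt := hc.2.2
            rw [hme, pvOrXor m w htb] at hlt
            omega),
          if_neg (by rintro ⟨h1, h0⟩; omega)]
    have hvalS : valT Amat vl k (m + 1) m'' w = pathsB Amat vl k m'' w := by
      unfold valT
      rw [if_pos ⟨hw1, by rw [hme]; exact pvTestBitOr m w,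
            by rw [hme, pvOrXor m w htb]; omega⟩]
    rw [hval0, hvalS, hme, pvFRec Amat vl k m w hw1 hw htb hm, zero_add]
    apply congrArg
    apply List.map_congr_left
    intro v hv
    have hvk := List.mem_range.mp hv
    by_cases hsv : ((subA Amat vl k).getD v []).getD w 0 ≠ 0
    · rw [if_pos ⟨hw1, hw, htb, rfl, hsv⟩, if_pos hsv,
        pvTblRowDiag Amat vl k m v hvk hm hmk]
    · rw [if_neg (fun hc => hsv hc.2.2.2.2), if_neg hsv]
  · have hzero : ((List.range k).map fun v =>
        if 1 ≤ w ∧ w < k ∧ m.testBit w = false ∧ m'' = m ||| (1 <<< w) ∧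
            ((subA Amat vl k).getD v []).getD w 0 ≠ 0
        then dgA (tblT Amat vl k m) m v else 0) = (List.range k).map (fun _ => (0 : Int)) := by
      apply List.map_congr_left
      intro v _
      rw [if_neg (fun hc => hD ⟨hc.1, hc.2.2.1, hc.2.2.2.1⟩)]
    rw [hzero]
    have hsum : ((List.range k).map (fun _ => (0 : Int))).sum = 0 := by simp
    rw [hsum, add_zero]
    unfold valT
    by_cases h1 : 1 ≤ w ∧ m''.testBit w = true ∧ m'' ^^^ (1 <<< w) < m
    · rw [if_pos h1, if_pos ⟨h1.1, h1.2.1, by have := h1.2.2; omega⟩]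
    · have h2 : ¬(1 ≤ w ∧ m''.testBit w = true ∧ m'' ^^^ (1 <<< w) < m + 1) := by
        intro h2
        have heq : m'' ^^^ (1 <<< w) = m := by
          rcases Nat.lt_or_ge (m'' ^^^ (1 <<< w)) m with hlt | hge
          · exact absurd ⟨h2.1, h2.2.1, hlt⟩ h1
          · omega
        have hf := (pvFlip m m'' w).mp ⟨h2.2.1, heq⟩
        exact hD ⟨h2.1, hf.1, hf.2⟩
      rw [if_neg h1, if_neg h2]

theorem pvOuter (Amat : List (List Int)) (vl : List Nat) (k : Nat) (a b : Nat)
    (ha : 0 < a) (hab : a + b ≤ 2 ^ k) :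
    (List.range' a b).foldl (stepMA (subA Amat vl k) k) (tblT Amat vl k a)
      = tblT Amat vl k (a + b) := by
  induction b generalizing a with
  | zero => rfl
  | succ p ih =>
    rw [List.range'_succ, List.foldl_cons,
        pvStep Amat vl k a ha (by omega),
        ih (a + 1) (by omega) (by omega)]
    have : a + 1 + p = a + (p + 1) := by omega
    rw [this]

theorem pvInit (Amat : List (List Int)) (vl : List Nat) (k : Nat) (hk : 3 ≤ k) :
    (List.replicate (2 ^ k) (List.replicate k (0 : Int))).set 1
      ((List.replicate k (0 : Int)).set 0 1) = tblT Amat vl k 1 := by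
  have h2k : 1 < 2 ^ k := by
    have : (2 : Nat) ^ 1 ≤ 2 ^ k := Nat.pow_le_pow_right (by norm_num) (by omega)
    omega
  apply pvDgEqTbl
  · constructor
    · simp
    · intro r hr
      rcases List.mem_or_eq_of_mem_set hr with h | h
      · rw [List.eq_of_mem_replicate h]; simp
      · subst h; simp
  · intro m'' hm'' w hw
    have hval : valT Amat vl k 1 m'' w = if m'' = 1 ∧ w = 0 then 1 else 0 := by
      unfold valT
      by_cases hc : 1 ≤ w ∧ m''.testBit w = true ∧ m'' ^^^ (1 <<< w) < 1
      · rw [if_pos hc]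
        obtain ⟨hw1, hbw, hx⟩ := hc
        have hxe : m'' ^^^ (1 <<< w) = 0 := by omega
        have hm2 : m'' = 1 <<< w := by
          have := Nat.xor_eq_zero.mp hxe
          exact this
        subst hm2
        rw [if_neg (by rintro ⟨h1, h0⟩; omega)]
        rw [pathsB]
        have hne1 : (1 : Nat) <<< w ≠ 1 := by
          rw [Nat.one_shiftLeft]
          intro hc
          have : (2 : Nat) ^ 1 ≤ 2 ^ w := Nat.pow_le_pow_right (by norm_num) (by omega)
          omega
        rw [if_neg hne1, if_neg (by push_neg; exact ⟨by omega, by simpa [pvAndShift] using hbw⟩)]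
        simp
      · rw [if_neg hc]
    rw [hval]
    unfold dgA
    by_cases h1 : m'' = 1
    · subst h1
      rw [List.getD_eq_getElem?_getD (l := (List.replicate (2 ^ k) _).set 1 _),
          List.getElem?_set_self (by simpa using h2k)]
      by_cases h0 : w = 0
      · subst h0
        simp only [Option.getD_some]
        rw [List.getD_eq_getElem?_getD, List.getElem?_set_self (by simpa using hw)]
        simp
      · simp only [Option.getD_some]
        rw [List.getD_eq_getElem?_getD, List.getElem?_set_ne (fun hh => h0 hh.symm)]
        simp [hw, h0]
    · rw [List.getD_eq_getElem?_getD (l := (List.replicate (2 ^ k) _).set 1 _),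
          List.getElem?_set_ne (fun hh => h1 hh.symm)]
      simp [hm'', h1, hw]

-- ---- core: the two cycle counters agree ----
theorem pvCount (Amat : List (List Int)) (vs : List Nat) :
    countA Amat vs = countB Amat vs := by
  simp only [countA, countB]
  by_cases hg : vs.length < 3 ∨ vs.length % 2 = 0
  · rw [if_pos hg, if_pos hg]
  · rw [if_neg hg, if_neg hg]
    have hk3 : 3 ≤ vs.length := by
      rcases not_or.mp hg with ⟨h1, _⟩
      omega
    have h2k1 : 1 ≤ 2 ^ vs.length := Nat.one_le_two_pow
    have hfull : 2 ^ vs.length - 1 < 2 ^ vs.length := by omega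
    rw [pvInit Amat vs vs.length hk3,
        pvOuter Amat vs vs.length 1 (2 ^ vs.length - 1) one_pos (by omega)]
    have he1 : 1 + (2 ^ vs.length - 1) = 2 ^ vs.length := by omega
    rw [he1]
    rw [pvFoldIfAdd (List.range' 1 (vs.length - 1))
        (fun v => dgA (tblT Amat vs vs.length (2 ^ vs.length)) (2 ^ vs.length - 1) v ≠ 0 ∧
          ((subA Amat vs vs.length).getD v []).getD 0 0 ≠ 0)
        (fun v => dgA (tblT Amat vs vs.length (2 ^ vs.length)) (2 ^ vs.length - 1) v) 0,
      pvFilterMapSum' (List.range' 1 (vs.length - 1))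
        (fun v => edgeB Amat vs v 0)
        (fun v => pathsB Amat vs vs.length (2 ^ vs.length - 1) v), zero_add]
    apply congrArg
    apply List.map_congr_left
    intro v hv
    have hv1 : 1 ≤ v := (List.mem_range'_1.mp hv).1
    have hvk : v < vs.length := by
      have h2 := (List.mem_range'_1.mp hv).2
      omega
    have hdg : dgA (tblT Amat vs vs.length (2 ^ vs.length)) (2 ^ vs.length - 1) v
        = pathsB Amat vs vs.length (2 ^ vs.length - 1) v := by
      rw [pvTblGet Amat vs vs.length (2 ^ vs.length) (2 ^ vs.length - 1) v hfull hvk]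
      unfold valT
      have htb : (2 ^ vs.length - 1).testBit v = true := by
        rw [Nat.testBit_two_pow_sub_one]
        simp [hvk]
      rw [if_pos ⟨hv1, htb, by
        have := pvXorLtOfTestBit (2 ^ vs.length - 1) v htb
        omega⟩]
    rw [hdg]
    have hse := pvSubEdge Amat vs vs.length v 0 hvk (by omega)
    by_cases he : edgeB Amat vs v 0 = true
    · by_cases hF : pathsB Amat vs vs.length (2 ^ vs.length - 1) v = 0
      · rw [if_neg (fun hc => hc.1 hF), if_pos he, hF]
      · rw [if_pos ⟨hF, hse.mpr he⟩, if_pos he]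
    · rw [if_neg (fun hc => he (hse.mp hc.2)), if_neg he]

-- range'-indexed inner loop over a suffix = map over drop
theorem pvMapRangeDrop {α β : Type} (d : β) (xs : List β) (f : β → α) :
    ∀ i, (List.range' i (xs.length - i)).map (fun j => f (xs.getD j d)) = (xs.drop i).map f := by
  suffices H : ∀ n i, xs.length - i = n →
      (List.range' i n).map (fun j => f (xs.getD j d)) = (xs.drop i).map f by
    intro i; exact H _ i rfl
  intro n
  induction n with
  | zero =>
    intro i h
    rw [List.drop_eq_nil_of_le (by omega)]
    simp
  | succ p ih =>
    intro i h
    have hi : i < xs.length := by omega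
    rw [List.range'_succ, List.drop_eq_getElem_cons hi]
    simp only [List.map_cons]
    rw [List.getD_eq_getElem xs d hi, ih (i + 1) (by omega)]

-- ---- outer structure: cycles, alpha_1, alpha_2 ----
def cycA (A : List (List Int)) (n : Int) : List (List Nat × Int × Int) :=
  (PySem.List.pyRange 3 (n + 1) 2).flatMap (fun size =>
    (pyCombos size.toNat (List.range n.toNat)).filterMap (fun sub =>
      if countA A sub > 0 then some (sub, countA A sub, size) else none))

theorem pvFoldPush {α β : Type} (l : List α) (c : α → Prop) [DecidablePred c] (g : α → β) :
    ∀ acc, l.foldl (fun cy x => if c x then cy ++ [g x] else cy) acc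
      = acc ++ l.filterMap (fun x => if c x then some (g x) else none) := by
  induction l with
  | nil => intro acc; simp
  | cons y t ih =>
    intro acc
    rw [List.foldl_cons, List.filterMap_cons]
    by_cases h : c y
    · rw [if_pos h, if_pos h, ih]
      simp
    · rw [if_neg h, if_neg h, ih]

theorem pvFoldAddOf {α : Type} (l : List α) (f : Int → α → Int) (g : α → Int)
    (h : ∀ a x, x ∈ l → f a x = a + g x) : ∀ a, l.foldl f a = a + (l.map g).sum := by
  induction l with
  | nil => intro a; simp
  | cons y t ih =>
    intro a
    rw [List.foldl_cons, h a y List.mem_cons_self,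
      ih (fun a x hx => h a x (List.mem_cons_of_mem y hx)) (a + g y)]
    simp only [List.map_cons, List.sum_cons]
    ring

theorem pvCycA (A : List (List Int)) (n : Int) :
    (PySem.List.pyRange 3 (n + 1) 2).foldl (fun cyc size =>
      (pyCombos size.toNat (List.range n.toNat)).foldl (fun cyc subset =>
        let cnt := countA A subset
        if cnt > 0 then cyc ++ [(subset, cnt, size)] else cyc) cyc) []
    = cycA A n := by
  unfold cycA
  suffices H : ∀ (ls : List Int) (acc : List (List Nat × Int × Int)),
      ls.foldl (fun cyc size =>
        (pyCombos size.toNat (List.range n.toNat)).foldl (fun cyc subset =>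
          let cnt := countA A subset
          if cnt > 0 then cyc ++ [(subset, cnt, size)] else cyc) cyc) acc
      = acc ++ ls.flatMap (fun size =>
          (pyCombos size.toNat (List.range n.toNat)).filterMap (fun sub =>
            if countA A sub > 0 then some (sub, countA A sub, size) else none)) by
    simpa using H (PySem.List.pyRange 3 (n + 1) 2) []
  intro ls
  induction ls with
  | nil => intro acc; simp
  | cons sz t ih =>
    intro acc
    rw [List.foldl_cons, List.flatMap_cons, ← List.append_assoc, ← pvFoldPush
        (pyCombos sz.toNat (List.range n.toNat))
        (fun sub => countA A sub > 0)
        (fun sub => (sub, countA A sub, sz)) acc]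
    exact ih _

theorem pvCycB (A : List (List Int)) (n : Int) :
    (PySem.List.pyRange 3 (n + 1) 2).flatMap (fun size =>
      (pyCombos size.toNat (List.range n.toNat)).filterMap (fun sub =>
        let cnt := countB A sub
        if cnt > 0 then some (sub, cnt) else none))
    = (cycA A n).map (fun t => (t.1, t.2.1)) := by
  unfold cycA
  rw [List.map_flatMap]
  congr 1
  funext size
  rw [List.map_filterMap]
  congr 1
  funext sub
  rw [← pvCount A sub]
  by_cases h : countA A sub > 0
  · simp [h]
  · simp [h]

theorem pvAlpha1 (xs : List (List Nat × Int × Int)) :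
    xs.foldl (fun s c => s + c.2.1) 0
      = ((xs.map (fun t => (t.1, t.2.1))).map (fun c => c.2)).sum := by
  rw [PySem.List.foldl_add xs (fun c => c.2.1) 0, List.map_map]
  simp [Function.comp_def]

theorem pvAlpha2 (xs : List (List Nat × Int × Int)) :
    (List.range xs.length).foldl (fun a2 i =>
      (List.range' (i + 1) (xs.length - (i + 1))).foldl (fun a2 j =>
        if ((xs.getD i ([], 0, 0)).1.filter
              (fun x => x ∈ (xs.getD j ([], 0, 0)).1)).length = 0
        then a2 + (xs.getD i ([], 0, 0)).2.1 * (xs.getD j ([], 0, 0)).2.1 else a2) a2) 0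
    = ((xs.map (fun t => (t.1, t.2.1))).zipIdx.flatMap (fun ci =>
        ((xs.map (fun t => (t.1, t.2.1))).drop (ci.2 + 1)).filterMap (fun d =>
          if (ci.1.1.filter (fun x => x ∈ d.1)).length = 0
          then some (ci.1.2 * d.2) else none))).sum := by
  -- both sides become a sum over i of a sum over the suffix after position i
  rw [pvSumFlatMap]
  rw [pvFoldAddOf (List.range xs.length) _
      (fun i => ((xs.drop (i + 1)).map (fun t =>
          if ((xs.getD i ([], 0, 0)).1.filter (fun x => x ∈ t.1)).length = 0
          then (xs.getD i ([], 0, 0)).2.1 * t.2.1 else 0)).sum) ?h 0, zero_add]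
  case h =>
    intro a i _
    rw [pvFoldIfAdd (List.range' (i + 1) (xs.length - (i + 1)))
        (fun j => ((xs.getD i ([], 0, 0)).1.filter
            (fun x => x ∈ (xs.getD j ([], 0, 0)).1)).length = 0)
        (fun j => (xs.getD i ([], 0, 0)).2.1 * (xs.getD j ([], 0, 0)).2.1) a,
      pvMapRangeDrop ([], 0, 0) xs (fun t =>
          if ((xs.getD i ([], 0, 0)).1.filter (fun x => x ∈ t.1)).length = 0
          then (xs.getD i ([], 0, 0)).2.1 * t.2.1 else 0) (i + 1)]
  apply congrArg
  apply List.ext_getElem (by simp)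
  intro i h1 h2
  have hiL : i < xs.length := by simpa using h1
  rw [List.getElem_map, List.getElem_range, List.getElem_map, List.getElem_zipIdx,
      List.getD_eq_getElem xs ([], 0, 0) hiL]
  simp only [Nat.zero_add, List.getElem_map]
  rw [pvFilterMapSum ((xs.map (fun t => (t.1, t.2.1))).drop (i + 1))
      (fun d => ((xs[i].1.filter (fun x => x ∈ d.1)).length = 0))
      (fun d => xs[i].2.1 * d.2)]
  simp only [List.map_drop, List.map_map]
  apply congrArg
  apply congrArg
  apply List.map_congr_left
  intro t _
  rfl

-- ===== VERDICT (by name: the statement is the Claim_ definition above) =====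
theorem compute_H_n8_spec : Claim_equal_compute_H_n8 := by
  intro A n _ _
  unfold Spec_compute_H_n8
  simp only [compute_H_n8, compute_H_n8_alt]
  rw [pvCycA A n, pvCycB A n, pvAlpha1 (cycA A n), pvAlpha2 (cycA A n)]
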